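-- pv_equiv track=rewrite | github.com/ariuk44/retake_exam_prep | day_15.py | isDigitSum
-- ===== SOURCE A (Python) =====
-- def isDigitSum(n, m):
--     if n < 0 or m < 0:
--         return -1
--     digit_sum = 0
--     while n > 0:
--         digit_sum += n % 10
--         n //= 10
--     return 1 if digit_sum < m else 0
-- ===== SOURCE B (Python) =====
-- def isDigitSum(n, m):
--     if n < 0 or m < 0:
--         return -1
--     return 1 if sum(int(c) for c in str(n)) < m else 0
-- ===== Notes on version B (the rewrite author's own statement) =====
-- stated objective: idiomatic
-- what changed: Replaces the arithmetic digit-extraction while-loop (n % 10 / n //= 10 with an accumulator) by a one-line string-based digit sum over the decimal characters of str(n).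
import Mathlib
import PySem

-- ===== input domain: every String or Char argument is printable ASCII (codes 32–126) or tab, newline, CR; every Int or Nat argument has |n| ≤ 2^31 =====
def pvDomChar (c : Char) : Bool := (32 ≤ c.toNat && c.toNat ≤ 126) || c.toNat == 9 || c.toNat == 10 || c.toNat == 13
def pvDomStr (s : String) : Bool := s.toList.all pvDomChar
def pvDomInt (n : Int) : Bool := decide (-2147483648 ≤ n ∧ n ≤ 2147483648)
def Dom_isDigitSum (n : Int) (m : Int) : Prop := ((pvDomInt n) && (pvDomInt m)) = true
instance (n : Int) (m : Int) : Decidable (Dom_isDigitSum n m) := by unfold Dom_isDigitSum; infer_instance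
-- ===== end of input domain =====

-- B replaces A's arithmetic digit-extraction loop with a string-based digit sum over str(n) (idiomatic, same cost).

-- ===== PORT A =====
-- the `while n > 0: digit_sum += n % 10; n //= 10` loop
def isDigitSumLoop (n : Int) (digitSum : Int) : Int :=
  if _h : n > 0 then
    isDigitSumLoop (PySem.Int.floordiv n 10) (digitSum + PySem.Int.mod n 10)
  else digitSum
termination_by n.toNat
decreasing_by
  simp only [PySem.Int.floordiv]
  rw [Int.fdiv_eq_ediv_of_nonneg n (by norm_num : (0:Int) ≤ 10)]
  omega

def isDigitSum (n : Int) (m : Int) : Int :=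
  if n < 0 ∨ m < 0 then -1
  else if isDigitSumLoop n 0 < m then 1 else 0

-- ===== PORT B =====
-- sum(int(c) for c in str(n)); int(c) = ord(c) - 48, exact here since for n ≥ 0
-- (guaranteed by the guard) str(n) consists of decimal digit characters only
def isDigitSum_alt (n : Int) (m : Int) : Int :=
  if n < 0 ∨ m < 0 then -1
  else if (PySem.Int.toStr n).toList.foldl (fun a c => a + ((c.toNat : Int) - 48)) 0 < m then 1
  else 0

-- ===== PRECONDITION & SPEC =====
def Spec_isDigitSum (n : Int) (m : Int) (out : Int) : Prop := out = isDigitSum_alt n m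
instance (n : Int) (m : Int) (out : Int) : Decidable (Spec_isDigitSum n m out) := by unfold Spec_isDigitSum; infer_instance

-- ===== CLAIM (what is proved, stated in full; the proofs are below) =====
def Claim_equal_isDigitSum : Prop := ∀ (n : Int) (m : Int), Dom_isDigitSum n m → Spec_isDigitSum n m (isDigitSum n m)

-- ===== LEMMAS AND PROOFS =====

-- reference digit sum of a natural number
def sumDigitsNat (n : Nat) : Nat :=
  if n = 0 then 0 else n % 10 + sumDigitsNat (n / 10)
decreasing_by omega

-- A's loop computes the reference digit sum
theorem loop_eq (k : Nat) : ∀ (n : Int) (acc : Int), 0 ≤ n → n.toNat = k →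
    isDigitSumLoop n acc = acc + (sumDigitsNat k : Int) := by
  induction k using Nat.strong_induction_on with
  | _ k ih =>
    intro n acc hn hk
    unfold isDigitSumLoop
    by_cases h : n > 0
    · simp only [h, dite_true]
      have h10 : (0:Int) < 10 := by norm_num
      have hfd : PySem.Int.floordiv n 10 = n / 10 :=
        Int.fdiv_eq_ediv_of_nonneg n (by norm_num : (0:Int) ≤ 10)
      have hmd : PySem.Int.mod n 10 = n % 10 := by
        simp [PySem.Int.mod, Int.fmod_eq_emod]
      rw [hfd, hmd, ih (n/10).toNat (by omega) (n/10) _ (by positivity) rfl]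
      have hsum : sumDigitsNat k = k % 10 + sumDigitsNat (k / 10) := by
        rw [sumDigitsNat]; simp [show ¬ k = 0 by omega]
      have h4 : (n / 10).toNat = k / 10 := by omega
      rw [hsum, h4]
      push_cast
      omega
    · simp only [h, dite_false]
      have : k = 0 := by omega
      rw [this, sumDigitsNat]
      simp

theorem digitChar_val (d : Nat) (hd : d < 10) : ((Nat.digitChar d).toNat : Int) - 48 = d := by
  interval_cases d <;> decide

-- character digit sum as a mapped sum
def sval (l : List Char) : Int := (l.map (fun c => (c.toNat : Int) - 48)).sum

theorem sval_digitChar_cons (d : Nat) (hd : d < 10) (acc : List Char) :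
    sval (Nat.digitChar d :: acc) = (d : Int) + sval acc := by
  simp only [sval, List.map_cons, List.sum_cons, digitChar_val d hd]

theorem foldl_sval (l : List Char) : ∀ (s : Int),
    l.foldl (fun a c => a + ((c.toNat : Int) - 48)) s = s + sval l := by
  induction l with
  | nil => intro s; simp [sval]
  | cons c t ih => intro s; simp [sval, List.foldl_cons, ih, List.map_cons]; ring

theorem core_sum (f : Nat) : ∀ (n : Nat) (acc : List Char), n ≤ f →
    sval (Nat.toDigitsCore 10 (f + 1) n acc) = (sumDigitsNat n : Int) + sval acc := by
  induction f with
  | zero =>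
    intro n acc hn
    have h0 : n = 0 := by omega
    subst h0
    norm_num [Nat.toDigitsCore]
    rw [sval_digitChar_cons 0 (by norm_num), sumDigitsNat]
    simp
  | succ f ih =>
    intro n acc hn
    rw [Nat.toDigitsCore]
    by_cases h : n / 10 = 0
    · simp only [h, if_true]
      rw [sumDigitsNat]
      by_cases h0 : n = 0
      · subst h0
        norm_num
        rw [sval_digitChar_cons 0 (by norm_num)]
        simp
      · simp only [h0, if_false, h]
        rw [sval_digitChar_cons _ (Nat.mod_lt _ (by norm_num)), sumDigitsNat]
        push_cast
        ring
    · simp only [h, if_false]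
      have hle : n / 10 ≤ f := by omega
      rw [ih (n / 10) _ hle, sval_digitChar_cons _ (Nat.mod_lt _ (by norm_num))]
      have h0 : ¬ n = 0 := by omega
      have hsum : sumDigitsNat n = n % 10 + sumDigitsNat (n / 10) := by
        rw [sumDigitsNat]; simp [h0]
      rw [hsum]
      push_cast
      ring

theorem toDigits_sum (k : Nat) : sval (Nat.toDigits 10 k) = (sumDigitsNat k : Int) := by
  have := core_sum k k [] (le_refl k)
  simpa [Nat.toDigits, sval] using this

-- ===== VERDICT (by name: the statement is the Claim_ definition above) =====
theorem isDigitSum_spec : Claim_equal_isDigitSum := by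
  intro n m _
  unfold Spec_isDigitSum isDigitSum isDigitSum_alt
  by_cases hg : n < 0 ∨ m < 0
  · simp [hg]
  · simp only [hg, if_false]
    have hn : 0 ≤ n := by omega
    have hchars : (PySem.Int.toStr n).toList = Nat.toDigits 10 n.toNat := by
      rw [PySem.Int.toList_toStr, PySem.Int.toChars]
      simp [not_lt.mpr hn]
    rw [hchars, foldl_sval, toDigits_sum, loop_eq n.toNat n 0 hn rfl]
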